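-- pv_equiv track=rewrite | github.com/LeandroNobrega/WallboxQA | qa_uinitest_solution/src/find_repeated_numbers.py | find_repeated_numbers
-- ===== SOURCE A (Python) =====
-- class EntryListException(Exception):
-- 	def __init__(self, sample, element):
-- 		self.sample = sample
-- 		self.element = element
-- 		super(EntryListException, self).__init__(f"Entry lists should contain only integers."
-- 												 f" Found element {self.element} in entry {self.sample}")
--
-- def find_repeated_numbers(first_list, second_list):
-- 	"""
-- 	Go through the given lists and return the number that appears first on both.
-- 	:param first_list: list of integers
-- 	:param second_list: list of integers
-- 	"""
-- 	assert_entries([first_list, second_list])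
-- 	chosen_element = None  # Variable to hold the value and the index of the first repeated number
-- 	if first_list and second_list:
-- 		for num in first_list:
-- 			if num in second_list:
-- 				# It is a repeated number!
-- 				current_index = min(first_list.index(num), second_list.index(num))
-- 				if chosen_element:
-- 					if current_index < chosen_element[-1]:  # Compare the newly found index to the previos stored one
-- 						chosen_element = (num, current_index)  # Replace the chosen element
-- 				else:
-- 					chosen_element = (num, current_index) # Found element stored as a tuple: (number, index)
-- 	if chosen_element:
-- 		return chosen_element[0]
-- 	else:
-- 		# The lists are completely different or empty
-- 		return None
--
-- def assert_entries(sample_lists):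
-- 	# Make sure that the entry lists are full integer lists
-- 	for sample in sample_lists: # 'entries' size will always be 2 for our case
-- 		for element in sample:
-- 			if not isinstance(element, int):
-- 				raise EntryListException(sample, element)
-- ===== SOURCE B (Python) =====
-- def find_repeated_numbers(first_list, second_list):
--     """Dovetail scan: walk both lists in lockstep by position k and return
--     immediately at the first position where a list's element occurs anywhere
--     in the other list (first-list side checked first at each k).  No best
--     accumulator, no index minimisation: the first firing position IS the
--     minimal min-index, so the answers coincide.  O(n+m) after building the
--     two membership sets."""
--     set1 = set(first_list)
--     set2 = set(second_list)
--     for k in range(max(len(first_list), len(second_list))):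
--         if k < len(first_list) and first_list[k] in set2:
--             return first_list[k]
--         if k < len(second_list) and second_list[k] in set1:
--             return second_list[k]
--     return None
-- ===== Notes on version B (the rewrite author's own statement) =====
-- stated objective: faster
-- what changed: Replaced A's best-accumulator search (scan first_list, compute min of two list.index scans per element, keep the smallest) by a lockstep positional dovetail scan of both lists that returns immediately at the first position whose element occurs in the other list's membership set; no index is ever computed or compared.
import Mathlib
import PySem

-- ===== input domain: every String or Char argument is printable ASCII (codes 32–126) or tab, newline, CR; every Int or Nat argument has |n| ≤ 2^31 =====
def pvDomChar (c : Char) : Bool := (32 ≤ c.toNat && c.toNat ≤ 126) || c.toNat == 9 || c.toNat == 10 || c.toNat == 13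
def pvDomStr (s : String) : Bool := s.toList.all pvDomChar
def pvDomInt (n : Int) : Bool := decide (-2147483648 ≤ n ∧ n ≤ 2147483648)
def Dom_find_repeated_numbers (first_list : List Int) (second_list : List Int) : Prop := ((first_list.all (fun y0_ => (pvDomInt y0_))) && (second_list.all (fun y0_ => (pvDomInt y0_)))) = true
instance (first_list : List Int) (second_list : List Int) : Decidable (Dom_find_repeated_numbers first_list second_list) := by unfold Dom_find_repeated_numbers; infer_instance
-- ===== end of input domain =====

-- B replaces A's best-accumulator min-index search by a lockstep positional scan of both
-- lists with an early return at the first position whose element occurs in the other list.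

-- ===== PORT A =====
-- A's loop body: guard `num in second_list`, then min of the two first-occurrence indices,
-- keep the stored pair unless the new index is strictly smaller.
def frnStepA (first_list : List Int) (second_list : List Int)
    (ch : Option (Int × Int)) (num : Int) : Option (Int × Int) :=
  if second_list.contains num then
    let ci : Int := min ((PySem.List.index? first_list num).getD 0 : Nat)
                        ((PySem.List.index? second_list num).getD 0 : Nat)
    match ch with
    | none => some (num, ci)
    | some (m, idx) => if ci < idx then some (num, ci) else some (m, idx)
  else ch

def find_repeated_numbers (first_list : List Int) (second_list : List Int) : Option Int :=
  let chosen : Option (Int × Int) :=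
    if first_list ≠ [] ∧ second_list ≠ [] then
      first_list.foldl (frnStepA first_list second_list) none
    else none
  match chosen with
  | some (n, _) => some n
  | none => none

-- ===== PORT B =====
-- B's `for k in range(max(len1, len2))` loop with its two `k < len` guards and early
-- returns is ported as the simultaneous structural recursion on the two suffixes
-- (exact: position k of the loop = head of the k-th pair of suffixes).
def frnGo (set1 set2 : PySem.Set Int) : List Int → List Int → Option Int
  | [], [] => none
  | a :: f, [] => if set2.contains a then some a else frnGo set1 set2 f []
  | [], b :: s => if set1.contains b then some b else frnGo set1 set2 [] s
  | a :: f, b :: s =>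
      if set2.contains a then some a
      else if set1.contains b then some b
      else frnGo set1 set2 f s

def find_repeated_numbers_alt (first_list : List Int) (second_list : List Int) : Option Int :=
  frnGo (PySem.Set.ofList first_list) (PySem.Set.ofList second_list) first_list second_list

-- ===== PRECONDITION & SPEC =====
def Spec_find_repeated_numbers (first_list : List Int) (second_list : List Int) (out : Option Int) : Prop := out = find_repeated_numbers_alt first_list second_list
instance (first_list : List Int) (second_list : List Int) (out : Option Int) : Decidable (Spec_find_repeated_numbers first_list second_list out) := by unfold Spec_find_repeated_numbers; infer_instance

-- ===== CLAIM (what is proved, stated in full; the proofs are below) =====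
def Claim_equal_find_repeated_numbers : Prop := ∀ (first_list : List Int) (second_list : List Int), Dom_find_repeated_numbers first_list second_list → Spec_find_repeated_numbers first_list second_list (find_repeated_numbers first_list second_list)

-- ===== LEMMAS AND PROOFS =====

-- A's inner update, abstracted over the (fixed) index-valuation v
def gstep (v : Int → Int) (ch : Option (Int × Int)) (x : Int) : Option (Int × Int) :=
  match ch with
  | none => some (x, v x)
  | some (m, idx) => if v x < idx then some (x, v x) else some (m, idx)

-- min of the two first-occurrence indices
def vmin (fl sl : List Int) (x : Int) : Int := min (fl.idxOf x : Int) (sl.idxOf x : Int)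

theorem idxOf?_of_mem {x : Int} {l : List Int} (h : x ∈ l) : l.idxOf? x = some (l.idxOf x) := by
  induction l with
  | nil => cases h
  | cons a t ih =>
    by_cases hax : a = x
    · subst hax; simp [List.idxOf?_cons]
    · rcases List.mem_cons.mp h with rfl | hm
      · exact absurd rfl hax
      · simp [List.idxOf?_cons, hax, ih hm]

theorem idxOf_le_of_getElem {l : List Int} {k : Nat} {x : Int} (hk : k < l.length)
    (h : l[k] = x) : l.idxOf x ≤ k := by
  induction l generalizing k with
  | nil => simp at hk
  | cons a t ih =>
    by_cases hax : a = x
    · simp [hax]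
    · cases k with
      | zero => simp at h; exact absurd h hax
      | succ k =>
        simp only [List.getElem_cons_succ] at h
        have hbeq : (a == x) = false := beq_eq_false_iff_ne.mpr hax
        simp only [List.idxOf_cons, hbeq, cond_false]
        have := ih (by simpa using hk) h
        omega

theorem idxOf_lt_of_mem_take {l : List Int} {k : Nat} {x : Int} (h : x ∈ l.take k) :
    l.idxOf x < k := by
  induction l generalizing k with
  | nil => simp at h
  | cons a t ih =>
    cases k with
    | zero => simp at h
    | succ k =>
      by_cases hax : a = x
      · simp [hax]
      · simp only [List.take_succ_cons, List.mem_cons] at h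
        rcases h with rfl | hm
        · exact absurd rfl hax
        · have hbeq : (a == x) = false := beq_eq_false_iff_ne.mpr hax
          simp only [List.idxOf_cons, hbeq, cond_false]
          have := ih hm
          omega

-- A's fold = fold of gstep over the common elements of first_list (in order)
theorem foldA_eq (fl sl : List Int) :
    fl.foldl (frnStepA fl sl) none
      = (fl.filter (fun x => sl.contains x)).foldl (gstep (vmin fl sl)) none := by
  rw [← PySem.List.foldl_if_eq_foldl_filter]
  apply PySem.List.foldl_congr_mem'
  intro x hx acc
  by_cases hc : sl.contains x = true
  · have hxs : x ∈ sl := by simpa using hc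
    simp only [frnStepA, hc, if_pos, gstep, vmin,
      PySem.List.index?_eq_idxOf?, idxOf?_of_mem hx, idxOf?_of_mem hxs, Option.getD_some]
  · simp only [frnStepA, hc, Bool.false_eq_true, if_false]

theorem foldl_gstep_stay (v : Int → Int) (q : List Int) (m b : Int)
    (h : ∀ y ∈ q, b ≤ v y) : q.foldl (gstep v) (some (m, b)) = some (m, b) := by
  induction q with
  | nil => rfl
  | cons y q ih =>
    have hy := h y (by simp)
    simp only [List.foldl_cons, gstep, if_neg (by omega : ¬ v y < b)]
    exact ih (fun z hz => h z (by simp [hz]))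

theorem foldl_gstep_first (v : Int → Int) (p q : List Int) (x : Int)
    (h1 : ∀ y ∈ p, v x < v y) (h2 : ∀ y ∈ q, v x ≤ v y) :
    (p ++ x :: q).foldl (gstep v) none = some (x, v x) := by
  rw [List.foldl_append]
  have hp : ∀ (p' : List Int), (∀ y ∈ p', v x < v y) → ∀ acc,
      (acc = none ∨ ∃ m b, acc = some (m, b) ∧ v x < b) →
      (p'.foldl (gstep v) acc = none ∨
        ∃ m b, p'.foldl (gstep v) acc = some (m, b) ∧ v x < b) := by
    intro p'
    induction p' with
    | nil => intro _ acc hacc; simpa using hacc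
    | cons y p' ih =>
      intro hy acc hacc
      simp only [List.foldl_cons]
      apply ih (fun z hz => hy z (List.mem_cons_of_mem _ hz))
      have hvy := hy y (by simp)
      rcases hacc with rfl | ⟨m, b, rfl, hb⟩
      · exact Or.inr ⟨y, v y, rfl, hvy⟩
      · simp only [gstep]
        split
        · exact Or.inr ⟨y, v y, rfl, hvy⟩
        · exact Or.inr ⟨m, b, rfl, hb⟩
  rcases hp p h1 none (Or.inl rfl) with hnone | ⟨m, b, heq, hb⟩
  · rw [hnone, List.foldl_cons]
    show q.foldl (gstep v) (gstep v none x) = _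
    simp only [gstep]
    exact foldl_gstep_stay v q x (v x) h2
  · rw [heq, List.foldl_cons]
    show q.foldl (gstep v) (gstep v (some (m, b)) x) = _
    simp only [gstep, if_pos hb]
    exact foldl_gstep_stay v q x (v x) h2

-- the dovetail scan: either nothing fires anywhere, or it returns the element of the
-- first firing position (first-list side first), with no earlier position firing
theorem frnGo_fire (S1 S2 : PySem.Set Int) (f : List Int) : ∀ (s : List Int),
    (frnGo S1 S2 f s = none ∧ (∀ a ∈ f, S2.contains a = false) ∧ (∀ b ∈ s, S1.contains b = false))
    ∨ (∃ x k,
        frnGo S1 S2 f s = some x ∧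
        ((∃ h : k < f.length, f[k] = x ∧ S2.contains x = true) ∨
         ((∃ h : k < s.length, s[k] = x ∧ S1.contains x = true) ∧
          ¬ (∃ h : k < f.length, S2.contains f[k] = true))) ∧
        (∀ k', k' < k →
          (¬ ∃ h : k' < f.length, S2.contains f[k'] = true) ∧
          (¬ ∃ h : k' < s.length, S1.contains s[k'] = true))) := by
  induction f with
  | nil =>
    intro s
    induction s with
    | nil => exact Or.inl ⟨by simp only [frnGo], by simp, by simp⟩
    | cons b s ihs =>
      by_cases hb : S1.contains b = true
      · refine Or.inr ⟨b, 0, by simp only [frnGo]; rw [if_pos hb], Or.inr ⟨⟨by simp, rfl, hb⟩, by simp⟩, ?_⟩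
        intro k' hk'; omega
      · have hb' : S1.contains b = false := by simpa using hb
        have heq : frnGo S1 S2 [] (b :: s) = frnGo S1 S2 [] s := by simp only [frnGo]; rw [if_neg hb]
        rcases ihs with ⟨hn, _, hs⟩ | ⟨x, k, hsome, hfire, hnf⟩
        · refine Or.inl ⟨by rw [heq, hn], by simp, ?_⟩
          intro b' hb''
          rcases List.mem_cons.mp hb'' with rfl | hm
          · exact hb'
          · exact hs b' hm
        · refine Or.inr ⟨x, k + 1, by rw [heq]; exact hsome, ?_, ?_⟩
          · rcases hfire with ⟨h, _⟩ | ⟨⟨h, hx, hc⟩, _⟩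
            · exact absurd h (by simp)
            · exact Or.inr ⟨⟨by simpa using h, by simpa using hx, hc⟩, by simp⟩
          · intro k' hk'
            cases k' with
            | zero => exact ⟨by simp, by rintro ⟨h, hc⟩; exact hb (by simpa using hc)⟩
            | succ k' =>
              obtain ⟨h1, h2⟩ := hnf k' (by omega)
              refine ⟨by simp, ?_⟩
              rintro ⟨h, hc⟩
              exact h2 ⟨by simpa using h, by simpa using hc⟩
  | cons a f ihf =>
    intro s
    by_cases ha : S2.contains a = true
    · refine Or.inr ⟨a, 0, ?_, Or.inl ⟨by simp, rfl, ha⟩, fun k' hk' => by omega⟩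
      cases s <;> (simp only [frnGo]; rw [if_pos ha])
    · have ha' : S2.contains a = false := by simpa using ha
      cases s with
      | nil =>
        have heq : frnGo S1 S2 (a :: f) [] = frnGo S1 S2 f [] := by simp only [frnGo]; rw [if_neg ha]
        rcases ihf [] with ⟨hn, hf, _⟩ | ⟨x, k, hsome, hfire, hnf⟩
        · refine Or.inl ⟨by rw [heq, hn], ?_, by simp⟩
          intro a' ha''
          rcases List.mem_cons.mp ha'' with rfl | hm
          · exact ha'
          · exact hf a' hm
        · refine Or.inr ⟨x, k + 1, by rw [heq]; exact hsome, ?_, ?_⟩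
          · rcases hfire with ⟨h, hx, hc⟩ | ⟨⟨h, _⟩, _⟩
            · exact Or.inl ⟨by simpa using h, by simpa using hx, hc⟩
            · exact absurd h (by simp)
          · intro k' hk'
            cases k' with
            | zero => exact ⟨by rintro ⟨h, hc⟩; exact ha (by simpa using hc), by simp⟩
            | succ k' =>
              obtain ⟨h1, h2⟩ := hnf k' (by omega)
              refine ⟨?_, by simp⟩
              rintro ⟨h, hc⟩
              exact h1 ⟨by simpa using h, by simpa using hc⟩
      | cons b s =>
        by_cases hb : S1.contains b = true
        · refine Or.inr ⟨b, 0, by simp only [frnGo]; rw [if_neg ha, if_pos hb], Or.inr ⟨⟨by simp, rfl, hb⟩, ?_⟩,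
            fun k' hk' => by omega⟩
          rintro ⟨h, hc⟩
          rw [show (a :: f)[0] = a from rfl] at hc
          exact ha hc
        · have hb' : S1.contains b = false := by simpa using hb
          have heq : frnGo S1 S2 (a :: f) (b :: s) = frnGo S1 S2 f s := by
            simp only [frnGo]; rw [if_neg ha, if_neg hb]
          rcases ihf s with ⟨hn, hf, hs⟩ | ⟨x, k, hsome, hfire, hnf⟩
          · refine Or.inl ⟨by rw [heq, hn], ?_, ?_⟩
            · intro a' ha''
              rcases List.mem_cons.mp ha'' with rfl | hm
              · exact ha'
              · exact hf a' hm
            · intro b' hb''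
              rcases List.mem_cons.mp hb'' with rfl | hm
              · exact hb'
              · exact hs b' hm
          · refine Or.inr ⟨x, k + 1, by rw [heq]; exact hsome, ?_, ?_⟩
            · rcases hfire with ⟨h, hx, hc⟩ | ⟨⟨h, hx, hc⟩, hno⟩
              · exact Or.inl ⟨by simpa using h, by simpa using hx, hc⟩
              · refine Or.inr ⟨⟨by simpa using h, by simpa using hx, hc⟩, ?_⟩
                rintro ⟨h', hc'⟩
                exact hno ⟨by simpa using h', by simpa using hc'⟩
            · intro k' hk'
              cases k' with
              | zero => exact ⟨by rintro ⟨h, hc⟩; exact ha (by simpa using hc), by rintro ⟨h, hc⟩; exact hb (by simpa using hc)⟩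
              | succ k' =>
                obtain ⟨h1, h2⟩ := hnf k' (by omega)
                constructor
                · rintro ⟨h, hc⟩
                  exact h1 ⟨by simpa using h, by simpa using hc⟩
                · rintro ⟨h, hc⟩
                  exact h2 ⟨by simpa using h, by simpa using hc⟩

-- ===== VERDICT (by name: the statement is the Claim_ definition above) =====
theorem find_repeated_numbers_spec : Claim_equal_find_repeated_numbers := by
  intro fl sl _
  show find_repeated_numbers fl sl = find_repeated_numbers_alt fl sl
  have memS1 : ∀ y, (PySem.Set.ofList fl).contains y = true ↔ y ∈ fl := fun y => by
    rw [PySem.Set.contains_iff, PySem.Set.mem_ofList]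
  have memS2 : ∀ y, (PySem.Set.ofList sl).contains y = true ↔ y ∈ sl := fun y => by
    rw [PySem.Set.contains_iff, PySem.Set.mem_ofList]
  rcases frnGo_fire (PySem.Set.ofList fl) (PySem.Set.ofList sl) fl sl with
    ⟨hn, hf, hs⟩ | ⟨x, k, hsome, hfire, hnf⟩
  · -- nothing fires: no common element at all, both sides are none
    have hfilter : fl.filter (fun y => sl.contains y) = [] := by
      rw [List.filter_eq_nil_iff]
      intro y hy hcy
      have hysl : y ∈ sl := by simpa using hcy
      have : (PySem.Set.ofList sl).contains y = true := (memS2 y).mpr hysl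
      rw [hf y hy] at this
      exact Bool.false_ne_true this
    rw [show find_repeated_numbers_alt fl sl = none from hn]
    unfold find_repeated_numbers
    by_cases hcond : fl ≠ [] ∧ sl ≠ []
    · rw [if_pos hcond, foldA_eq, hfilter]
      rfl
    · rw [if_neg hcond]
  · -- the scan fired at position k with element x
    rw [show find_repeated_numbers_alt fl sl = some x from hsome]
    -- no common element has a first occurrence before k in either list
    have hge : ∀ y, y ∈ fl → y ∈ sl → k ≤ fl.idxOf y ∧ k ≤ sl.idxOf y := by
      intro y hy1 hy2
      constructor
      · by_contra h
        push Not at h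
        have hlt : fl.idxOf y < fl.length := List.idxOf_lt_length_of_mem hy1
        exact (hnf _ h).1 ⟨hlt, by rw [List.getElem_idxOf]; exact (memS2 y).mpr hy2⟩
      · by_contra h
        push Not at h
        have hlt : sl.idxOf y < sl.length := List.idxOf_lt_length_of_mem hy2
        exact (hnf _ h).2 ⟨hlt, by rw [List.getElem_idxOf]; exact (memS1 y).mpr hy1⟩
    rcases hfire with ⟨hk, hkx, hcx⟩ | ⟨⟨hk, hkx, hcx⟩, hnl⟩
    · -- fired on the first-list side: x = fl[k], x ∈ sl
      have hxsl : x ∈ sl := (memS2 x).mp hcx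
      have hxfl : x ∈ fl := hkx ▸ List.getElem_mem hk
      have hidx : fl.idxOf x = k :=
        le_antisymm (idxOf_le_of_getElem hk hkx) ((hge x hxfl hxsl).1)
      have hvx : vmin fl sl x = (k : Int) := by
        unfold vmin
        rw [hidx]
        exact min_eq_left (by exact_mod_cast (hge x hxfl hxsl).2)
      have hdecomp : fl = fl.take k ++ x :: fl.drop (k + 1) := by
        conv_lhs => rw [← List.take_append_drop k fl]
        rw [List.drop_eq_getElem_cons hk, hkx]
      have hptake : (fl.take k).filter (fun y => sl.contains y) = [] := by
        rw [List.filter_eq_nil_iff]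
        intro y hy hcy
        have hyfl : y ∈ fl := List.mem_of_mem_take hy
        have hysl : y ∈ sl := by simpa using hcy
        have h1 := (hge y hyfl hysl).1
        have h2 := idxOf_lt_of_mem_take hy
        omega
      have hxpred : sl.contains x = true := by simpa using hxsl
      have hfilter : fl.filter (fun y => sl.contains y)
          = [] ++ x :: (fl.drop (k + 1)).filter (fun y => sl.contains y) := by
        conv_lhs => rw [hdecomp]
        rw [List.filter_append, List.filter_cons_of_pos hxpred, hptake]
      have hq : ∀ y ∈ (fl.drop (k + 1)).filter (fun y => sl.contains y),
          vmin fl sl x ≤ vmin fl sl y := by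
        intro y hy
        have hyfl : y ∈ fl := List.mem_of_mem_drop (List.mem_of_mem_filter hy)
        have hysl : y ∈ sl := by simpa using List.of_mem_filter hy
        rw [hvx]
        exact le_min (by exact_mod_cast (hge y hyfl hysl).1)
          (by exact_mod_cast (hge y hyfl hysl).2)
      have hcond : fl ≠ [] ∧ sl ≠ [] :=
        ⟨List.ne_nil_of_mem hxfl, List.ne_nil_of_mem hxsl⟩
      unfold find_repeated_numbers
      rw [if_pos hcond, foldA_eq, hfilter,
        foldl_gstep_first (vmin fl sl) [] _ x (by simp) hq]
    · -- fired on the second-list side: x = sl[k], x ∈ fl, fl[k] (if any) is not common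
      have hxsl : x ∈ sl := hkx ▸ List.getElem_mem hk
      have hxfl : x ∈ fl := (memS1 x).mp hcx
      have hjdx : sl.idxOf x = k :=
        le_antisymm (idxOf_le_of_getElem hk hkx) ((hge x hxfl hxsl).2)
      have hi : fl.idxOf x < fl.length := List.idxOf_lt_length_of_mem hxfl
      have hfi : fl[fl.idxOf x] = x := List.getElem_idxOf hi
      have hki : k ≤ fl.idxOf x := (hge x hxfl hxsl).1
      have hvx : vmin fl sl x = (k : Int) := by
        unfold vmin
        rw [hjdx]
        exact min_eq_right (by exact_mod_cast hki)
      have hdecomp : fl = fl.take (fl.idxOf x) ++ x :: fl.drop (fl.idxOf x + 1) := by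
        conv_lhs => rw [← List.take_append_drop (fl.idxOf x) fl]
        rw [List.drop_eq_getElem_cons hi, hfi]
      have hxpred : sl.contains x = true := by simpa using hxsl
      have hfilter : fl.filter (fun y => sl.contains y)
          = (fl.take (fl.idxOf x)).filter (fun y => sl.contains y)
            ++ x :: (fl.drop (fl.idxOf x + 1)).filter (fun y => sl.contains y) := by
        conv_lhs => rw [hdecomp]
        rw [List.filter_append, List.filter_cons_of_pos hxpred]
      have hp : ∀ y ∈ (fl.take (fl.idxOf x)).filter (fun y => sl.contains y),
          vmin fl sl x < vmin fl sl y := by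
        intro y hy
        have hyt : y ∈ fl.take (fl.idxOf x) := List.mem_of_mem_filter hy
        have hyfl : y ∈ fl := List.mem_of_mem_take hyt
        have hysl : y ∈ sl := by simpa using List.of_mem_filter hy
        have hy1 := (hge y hyfl hysl).1
        have hy2 := (hge y hyfl hysl).2
        have hylt : fl.idxOf y < fl.idxOf x := idxOf_lt_of_mem_take hyt
        have hne1 : fl.idxOf y ≠ k := by
          intro hiy
          subst hiy
          have hylen : fl.idxOf y < fl.length := List.idxOf_lt_length_of_mem hyfl
          refine hnl ⟨hylen, ?_⟩
          rw [List.getElem_idxOf hylen]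
          exact (memS2 y).mpr hysl
        have hne2 : sl.idxOf y ≠ k := by
          intro hjy
          subst hjy
          have hylen : sl.idxOf y < sl.length := List.idxOf_lt_length_of_mem hysl
          have hyx : y = x := (List.getElem_idxOf hylen).symm.trans hkx
          rw [hyx] at hylt
          exact lt_irrefl _ hylt
        rw [hvx]
        exact lt_min (by exact_mod_cast by omega) (by exact_mod_cast by omega)
      have hq : ∀ y ∈ (fl.drop (fl.idxOf x + 1)).filter (fun y => sl.contains y),
          vmin fl sl x ≤ vmin fl sl y := by
        intro y hy
        have hyfl : y ∈ fl := List.mem_of_mem_drop (List.mem_of_mem_filter hy)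
        have hysl : y ∈ sl := by simpa using List.of_mem_filter hy
        rw [hvx]
        exact le_min (by exact_mod_cast (hge y hyfl hysl).1)
          (by exact_mod_cast (hge y hyfl hysl).2)
      have hcond : fl ≠ [] ∧ sl ≠ [] :=
        ⟨List.ne_nil_of_mem hxfl, List.ne_nil_of_mem hxsl⟩
      unfold find_repeated_numbers
      rw [if_pos hcond, foldA_eq, hfilter, foldl_gstep_first (vmin fl sl) _ _ x hp hq]
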